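-- pv_equiv track=rewrite | github.com/pengineu/cp1_assignment | midterm_special_selection/2022_Mid-1.py | fisherman
-- ===== SOURCE A (Python) =====
-- def fisherman(fish, gumul):
--     fish_list = [0]
--     for m in range(11 - gumul):
--         for n in range(11 - gumul):
--             fish_count = 0
--             fish_repo = fish.copy()
--             for i in range(gumul + 1):
--                 i = i + m
--                 for j in range(gumul + 1):
--                     j = j + n
--                     while [i, j] in fish_repo:
--                         fish_count += 1
--                         fish_repo.remove([i, j])
--             fish_list.append(fish_count)
--     return max(fish_list)
-- ===== SOURCE B (Python) =====
-- def fisherman(fish, gumul):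
--     best = 0
--     for m in range(11 - gumul):
--         for n in range(11 - gumul):
--             c = 0
--             for x in fish:
--                 if len(x) == 2 and m <= x[0] <= m + gumul and n <= x[1] <= n + gumul:
--                     c += 1
--             best = max(best, c)
--     return best
-- ===== Notes on version B (the rewrite author's own statement) =====
-- stated objective: alternative
-- what changed: Instead of copying the fish list for each net position and scanning every cell of the net with a repeated 'in'-test plus list.remove, B makes one pass over the fish list per net position, testing each fish's coordinates against the window bounds and keeping a running maximum (no list copy, no removal, no per-cell scan).
import Mathlib
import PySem

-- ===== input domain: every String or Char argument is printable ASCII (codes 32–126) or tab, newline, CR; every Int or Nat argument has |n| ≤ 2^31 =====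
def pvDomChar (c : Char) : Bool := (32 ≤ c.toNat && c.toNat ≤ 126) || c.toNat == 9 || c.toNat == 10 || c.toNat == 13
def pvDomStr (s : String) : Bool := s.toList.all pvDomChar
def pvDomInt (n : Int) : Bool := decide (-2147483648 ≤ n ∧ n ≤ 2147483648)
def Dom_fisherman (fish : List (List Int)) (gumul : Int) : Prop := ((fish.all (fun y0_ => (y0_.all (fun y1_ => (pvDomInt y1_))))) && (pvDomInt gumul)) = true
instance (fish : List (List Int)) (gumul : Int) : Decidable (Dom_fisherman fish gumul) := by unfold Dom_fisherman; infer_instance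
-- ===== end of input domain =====

-- B replaces A's per-position scan of every net cell (membership test + list.remove on a copied
-- fish list) by a single pass over the fish list per net position (range test per fish, running
-- maximum); objective: alternative.

-- ===== PORT A =====
-- 'while [i, j] in fish_repo: fish_count += 1; fish_repo.remove([i, j])'
-- (under the membership guard Python's list.remove equals List.erase: PySem.List.remove?_eq_some_erase)
def whileRemoveA (cell : List Int) (cnt : Int) (repo : List (List Int)) : Int × List (List Int) :=
  if h : cell ∈ repo then whileRemoveA cell (cnt + 1) (repo.erase cell)
  else (cnt, repo)
termination_by repo.length
decreasing_by
  have h1 : (repo.erase cell).length = repo.length - 1 := List.length_erase_of_mem h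
  have h2 : 0 < repo.length := List.length_pos_of_mem h
  omega

def fisherman (fish : List (List Int)) (gumul : Int) : Int :=
  let fish_list := (PySem.List.pyRange 0 (11 - gumul) 1).foldl (fun fl m =>
    (PySem.List.pyRange 0 (11 - gumul) 1).foldl (fun fl n =>
      let res := (PySem.List.pyRange 0 (gumul + 1) 1).foldl (fun st i0 =>
        let i := i0 + m
        (PySem.List.pyRange 0 (gumul + 1) 1).foldl (fun st j0 =>
          let j := j0 + n
          whileRemoveA [i, j] st.1 st.2) st) ((0 : Int), fish)
      fl ++ [res.1]) fl) [(0 : Int)]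
  -- max(fish_list); fish_list starts with 0, so it is never empty and Python's max never raises
  (PySem.List.max? fish_list (fun y => y)).getD 0

-- ===== PORT B =====
def fisherman_alt (fish : List (List Int)) (gumul : Int) : Int :=
  (PySem.List.pyRange 0 (11 - gumul) 1).foldl (fun best m =>
    (PySem.List.pyRange 0 (11 - gumul) 1).foldl (fun best n =>
      let c := fish.foldl (fun c x =>
        match x with
        | [a, b] =>
          if m ≤ a ∧ a ≤ m + gumul ∧ n ≤ b ∧ b ≤ n + gumul then c + 1 else c
        | _ => c) (0 : Int)
      max best c) best) 0

-- ===== PRECONDITION & SPEC =====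
def Spec_fisherman (fish : List (List Int)) (gumul : Int) (out : Int) : Prop := out = fisherman_alt fish gumul
instance (fish : List (List Int)) (gumul : Int) (out : Int) : Decidable (Spec_fisherman fish gumul out) := by unfold Spec_fisherman; infer_instance

-- ===== CLAIM (what is proved, stated in full; the proofs are below) =====
def Claim_equal_fisherman : Prop := ∀ (fish : List (List Int)) (gumul : Int), Dom_fisherman fish gumul → Spec_fisherman fish gumul (fisherman fish gumul)

-- ===== LEMMAS AND PROOFS =====

-- the Bool test B applies to one fish
def inWin (m n gumul : Int) (x : List Int) : Bool :=
  match x with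
  | [a, b] => decide (m ≤ a ∧ a ≤ m + gumul ∧ n ≤ b ∧ b ≤ n + gumul)
  | _ => false

-- the list of net cells A scans for net position (m, n)
def cellsOf (m n gumul : Int) : List (List Int) :=
  (PySem.List.pyRange 0 (gumul + 1) 1).flatMap (fun i0 =>
    (PySem.List.pyRange 0 (gumul + 1) 1).map (fun j0 => [i0 + m, j0 + n]))

-- A's per-(m,n) count, written as a fold over the cell list
def cntA (fish : List (List Int)) (m n gumul : Int) : Int :=
  ((cellsOf m n gumul).foldl (fun st c => whileRemoveA c st.1 st.2) ((0 : Int), fish)).1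

theorem filter_erase_of_not (l : List (List Int)) (a : List Int) (p : List Int → Bool)
    (hp : p a = false) : (l.erase a).filter p = l.filter p := by
  induction l with
  | nil => simp
  | cons x t ih =>
    by_cases hx : x = a
    · subst hx; simp [List.erase_cons_head, hp]
    · rw [List.erase_cons_tail (by simpa using hx)]
      simp only [List.filter_cons, ih]

theorem whileRemoveA_eq (cell : List Int) (cnt : Int) (repo : List (List Int)) :
    whileRemoveA cell cnt repo
      = (cnt + (repo.count cell : Int), repo.filter (fun x => !(x == cell))) := by
  fun_induction whileRemoveA cell cnt repo with
  | case1 cnt repo h ih =>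
    rw [ih]
    have h1 : (repo.erase cell).count cell = repo.count cell - 1 := List.count_erase_self ..
    have h2 : 0 < repo.count cell := List.count_pos_iff.mpr h
    have h3 : (repo.erase cell).filter (fun x => !(x == cell))
        = repo.filter (fun x => !(x == cell)) := filter_erase_of_not _ _ _ (by simp)
    rw [h1, h3]
    congr 1
    omega
  | case2 cnt repo h =>
    have h0 : repo.count cell = 0 := List.count_eq_zero.mpr h
    have hf : repo.filter (fun x => !(x == cell)) = repo := by
      apply List.filter_eq_self.mpr
      intro a ha
      simp only [Bool.not_eq_eq_eq_not, Bool.not_true, beq_eq_false_iff_ne, ne_eq]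
      rintro rfl; exact h ha
    rw [h0, hf]
    simp

theorem chainW (cs : List (List Int)) (h : cs.Nodup) (cnt : Int) (repo : List (List Int)) :
    cs.foldl (fun st c => whileRemoveA c st.1 st.2) (cnt, repo)
      = (cnt + ((cs.map (fun c => (repo.count c : Int))).sum),
         repo.filter (fun x => !(decide (x ∈ cs)))) := by
  induction cs generalizing cnt repo with
  | nil => simp
  | cons c t ih =>
    rw [List.nodup_cons] at h
    have step1 : (c :: t).foldl (fun st c => whileRemoveA c st.1 st.2) (cnt, repo)
        = t.foldl (fun st c => whileRemoveA c st.1 st.2)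
            (cnt + (repo.count c : Int), repo.filter (fun x => !(x == c))) := by
      simp only [List.foldl_cons]
      rw [whileRemoveA_eq]
    rw [step1, ih h.2, Prod.mk.injEq]
    constructor
    · -- counts
      simp only [List.map_cons, List.sum_cons]
      have hmap : t.map (fun c' => (((repo.filter (fun x => !(x == c))).count c' : Nat) : Int))
          = t.map (fun c' => ((repo.count c' : Nat) : Int)) := by
        apply List.map_congr_left
        intro c' hc'
        have hne : c' ≠ c := fun e => h.1 (e ▸ hc')
        rw [List.count_filter]
        simp [hne]
      rw [hmap]; ring
    · -- repo
      rw [List.filter_filter]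
      apply List.filter_congr
      intro x _
      by_cases hxc : x = c <;> simp [hxc, List.mem_cons, Bool.and_comm]

theorem foldl_foldl_flatMap {α β σ : Type} (l : List α) (g : α → List β)
    (f : σ → β → σ) (init : σ) :
    l.foldl (fun s a => (g a).foldl f s) init = (l.flatMap g).foldl f init := by
  induction l generalizing init with
  | nil => simp
  | cons x t ih => simp [List.flatMap_cons, List.foldl_append, ih]

theorem nodup_cellsOf (m n gumul : Int) : (cellsOf m n gumul).Nodup := by
  unfold cellsOf
  rw [List.nodup_flatMap]
  constructor
  · intro i0 _
    apply (PySem.List.nodup_pyRange_one _ _).map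
    intro a b hab
    simpa using List.cons.inj (List.cons.inj hab).2
  · apply (PySem.List.nodup_pyRange_one _ _).imp
    intro i0 i0' hne x hx hx'
    simp only [List.mem_map] at hx hx'
    obtain ⟨j0, _, rfl⟩ := hx
    obtain ⟨j0', _, he⟩ := hx'
    simp only [List.cons.injEq] at he
    omega

theorem mem_cellsOf (m n gumul : Int) (x : List Int) :
    x ∈ cellsOf m n gumul ↔ inWin m n gumul x = true := by
  unfold cellsOf
  simp only [List.mem_flatMap, List.mem_map, PySem.List.mem_pyRange_one]
  constructor
  · rintro ⟨i0, hi, j0, hj, rfl⟩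
    simp only [inWin, decide_eq_true_eq]
    omega
  · intro hw
    match x, hw with
    | [a, b], hw =>
      simp only [inWin, decide_eq_true_eq] at hw
      refine ⟨a - m, by omega, b - n, by omega, ?_⟩
      simp only [List.cons.injEq, and_true]
      omega

theorem countP_eq_sum_count (l cs : List (List Int)) (hn : cs.Nodup) (q : List Int → Bool)
    (hq : ∀ x, q x = true ↔ x ∈ cs) :
    l.countP q = (cs.map (fun c => l.count c)).sum := by
  induction l with
  | nil => simp
  | cons x t ih =>
    rw [List.countP_cons]
    have hR : cs.map (fun c => (x :: t).count c)
        = cs.map (fun c => t.count c + if x == c then 1 else 0) := by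
      apply List.map_congr_left
      intro c _
      rw [List.count_cons]
    have hind : ∀ (ds : List (List Int)),
        (ds.map (fun c => if x == c then 1 else 0)).sum = ds.count x := by
      intro ds
      induction ds with
      | nil => simp
      | cons d ds ihd =>
        simp only [List.map_cons, List.sum_cons, List.count_cons, ihd]
        by_cases hdx : x = d
        · subst hdx; simp; omega
        · simp [hdx, Ne.symm hdx]
    have hsplit : (cs.map (fun c => t.count c + if x == c then 1 else 0)).sum
        = (cs.map (fun c => t.count c)).sum + (cs.map (fun c => if x == c then 1 else 0)).sum := by
      rw [← List.sum_map_add]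
    rw [hR, hsplit, hind, ih]
    by_cases hx : q x
    · have hmem : x ∈ cs := (hq x).mp hx
      rw [List.count_eq_one_of_mem hn hmem]
      simp [hx]
    · have hmem : x ∉ cs := fun hm => hx ((hq x).mpr hm)
      rw [List.count_eq_zero.mpr hmem]
      simp [hx]

-- A's window count equals B's window count
theorem cntA_eq (fish : List (List Int)) (m n gumul : Int) :
    cntA fish m n gumul = (fish.countP (inWin m n gumul) : Int) := by
  unfold cntA
  rw [chainW _ (nodup_cellsOf m n gumul)]
  simp only
  rw [countP_eq_sum_count fish (cellsOf m n gumul) (nodup_cellsOf m n gumul)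
      (inWin m n gumul) (fun x => (mem_cellsOf m n gumul x).symm)]
  rw [Nat.cast_list_sum, List.map_map]
  simp only [Function.comp_def, zero_add]

-- B's inner fold over the fish equals a countP
theorem foldB_eq (fish : List (List Int)) (m n gumul : Int) (c0 : Int) :
    fish.foldl (fun c x =>
        match x with
        | [a, b] =>
          if m ≤ a ∧ a ≤ m + gumul ∧ n ≤ b ∧ b ≤ n + gumul then c + 1 else c
        | _ => c) c0 = c0 + (fish.countP (inWin m n gumul) : Int) := by
  induction fish generalizing c0 with
  | nil => simp
  | cons x t ih =>
    rw [List.foldl_cons, List.countP_cons, ih]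
    match x with
    | [] => simp [inWin]
    | [a] => simp [inWin]
    | [a, b] =>
      by_cases hw : m ≤ a ∧ a ≤ m + gumul ∧ n ≤ b ∧ b ≤ n + gumul
      · simp only [inWin, decide_eq_true_eq, if_pos hw]
        push_cast; ring
      · simp only [inWin, decide_eq_true_eq, if_neg hw]
        simp
    | a :: b :: c :: t => simp [inWin]

-- A's nested cell loop is the fold over cellsOf
theorem resA_eq (fish : List (List Int)) (m n gumul : Int) :
    ((PySem.List.pyRange 0 (gumul + 1) 1).foldl (fun st i0 =>
        (PySem.List.pyRange 0 (gumul + 1) 1).foldl (fun st j0 =>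
          whileRemoveA [i0 + m, j0 + n] st.1 st.2) st) ((0 : Int), fish)).1
      = cntA fish m n gumul := by
  unfold cntA cellsOf
  congr 1
  rw [← foldl_foldl_flatMap]
  apply PySem.List.foldl_congr_mem
  intro st i0 _
  rw [List.foldl_map]

-- ===== VERDICT (by name: the statement is the Claim_ definition above) =====
theorem fisherman_spec : Claim_equal_fisherman := by
  intro fish gumul _
  unfold Spec_fisherman fisherman fisherman_alt
  simp only
  -- A's fish_list is [0] ++ the list of window counts
  have hA : (PySem.List.pyRange 0 (11 - gumul) 1).foldl (fun fl m =>
      (PySem.List.pyRange 0 (11 - gumul) 1).foldl (fun fl n =>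
        fl ++ [((PySem.List.pyRange 0 (gumul + 1) 1).foldl (fun st i0 =>
          (PySem.List.pyRange 0 (gumul + 1) 1).foldl (fun st j0 =>
            whileRemoveA [i0 + m, j0 + n] st.1 st.2) st) ((0 : Int), fish)).1]) fl) [(0 : Int)]
      = [(0 : Int)] ++ (PySem.List.pyRange 0 (11 - gumul) 1).flatMap (fun m =>
          (PySem.List.pyRange 0 (11 - gumul) 1).map (fun n => cntA fish m n gumul)) := by
    have hbody : (fun (fl : List Int) m =>
        (PySem.List.pyRange 0 (11 - gumul) 1).foldl (fun fl n =>
          fl ++ [((PySem.List.pyRange 0 (gumul + 1) 1).foldl (fun st i0 =>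
            (PySem.List.pyRange 0 (gumul + 1) 1).foldl (fun st j0 =>
              whileRemoveA [i0 + m, j0 + n] st.1 st.2) st) ((0 : Int), fish)).1]) fl)
        = (fun fl m => fl ++ (PySem.List.pyRange 0 (11 - gumul) 1).map
            (fun n => cntA fish m n gumul)) := by
      funext fl m
      simp only [resA_eq]
      exact PySem.List.foldl_append_singleton_eq_map _ _ _
    rw [hbody]
    exact PySem.List.foldl_append_eq_flatMap _ _ _
  rw [hA]
  rw [List.singleton_append, PySem.List.max?_id_cons, Option.getD_some]
  -- B is the running max over the same flat list
  have hB : (fun (best : Int) m =>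
      (PySem.List.pyRange 0 (11 - gumul) 1).foldl (fun best n =>
        max best (fish.foldl (fun c x =>
          match x with
          | [a, b] =>
            if m ≤ a ∧ a ≤ m + gumul ∧ n ≤ b ∧ b ≤ n + gumul then c + 1 else c
          | _ => c) (0 : Int))) best)
      = (fun best m => ((PySem.List.pyRange 0 (11 - gumul) 1).map
          (fun n => cntA fish m n gumul)).foldl max best) := by
    funext best m
    rw [List.foldl_map]
    apply PySem.List.foldl_congr_mem
    intro b n _
    rw [foldB_eq, cntA_eq]
    simp
  rw [hB, foldl_foldl_flatMap]
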